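-- pv_equiv track=rewrite | github.com/funktor/stokastik | LeetCode/MaximalRectangle2.py | get_column_flow
-- ===== SOURCE A (Python) =====
-- def get_column_flow(matrix, max_len_rt, direction=1):
--     flow = [[0] * (len(matrix[0])) for _ in range(len(matrix))]
--
--     n, m = range(len(matrix)), range(len(matrix[0]))
--
--     r_iter = n[::-1] if direction == 1 else n
--     c_iter = m[::-1] if direction == 1 else m
--
--     edge_row = len(matrix) - 1 if direction == 1 else 0
--
--     for row in r_iter:
--         for col in c_iter:
--             if matrix[row][col] == "1":
--                 if row == edge_row or max_len_rt[row][col] > max_len_rt[row + direction][col]: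
--                     flow[row][col] = row + direction
--
--                 else:
--                     y = row + direction
--
--                     while True:
--                         x = flow[y][col]
--
--                         if x == edge_row + direction or max_len_rt[row][col] > max_len_rt[x][col]:
--                             flow[row][col] = x
--                             break
--
--                         else:
--                             y = x
--
--     return flow
-- ===== SOURCE B (Python) =====
-- def get_column_flow(matrix, max_len_rt, direction=1):
--     # Direct per-cell scan: for each '1' cell walk toward the edge until a strictly
--     # smaller max_len_rt value (or the edge sentinel) is found; no flow table, no
--     # pointer jumping.
--     n, m = len(matrix), len(matrix[0])
--     edge = n - 1 if direction == 1 else 0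
--     out = []
--     for r in range(n):
--         row_out = []
--         for c in range(m):
--             if matrix[r][c] == "1":
--                 v = max_len_rt[r][c]
--                 y = r + direction
--                 while y != edge + direction and max_len_rt[y][c] >= v:
--                     y += direction
--                 row_out.append(y)
--             else:
--                 row_out.append(0)
--         out.append(row_out)
--     return out
-- ===== Notes on version B (the rewrite author's own statement) =====
-- stated objective: simpler
-- what changed: Replaces A's mutable flow table and pointer-jumping while-loop (which chases previously written flow entries) by a direct per-cell scan that walks each column toward the edge until the first strictly smaller max_len_rt value, building the output row by row.
-- outside the precondition, e.g. on get_column_flow([['1']], [], 1): A returns [[1]], B raises IndexError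
import Mathlib
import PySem

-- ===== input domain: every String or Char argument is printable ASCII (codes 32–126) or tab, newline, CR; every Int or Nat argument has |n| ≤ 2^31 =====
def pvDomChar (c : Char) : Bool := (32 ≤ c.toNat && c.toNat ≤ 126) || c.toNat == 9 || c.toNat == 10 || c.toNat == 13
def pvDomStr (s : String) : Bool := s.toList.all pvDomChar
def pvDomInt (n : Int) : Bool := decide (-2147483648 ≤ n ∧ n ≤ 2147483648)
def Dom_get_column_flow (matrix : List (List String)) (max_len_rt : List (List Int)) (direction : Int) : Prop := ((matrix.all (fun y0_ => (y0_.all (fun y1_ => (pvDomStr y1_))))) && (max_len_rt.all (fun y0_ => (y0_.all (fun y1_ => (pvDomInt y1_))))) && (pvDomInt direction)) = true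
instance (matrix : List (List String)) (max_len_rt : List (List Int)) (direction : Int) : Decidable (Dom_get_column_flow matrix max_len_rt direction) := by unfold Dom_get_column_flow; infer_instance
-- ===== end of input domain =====

-- B replaces A's mutable flow table and pointer-jumping while-loop by a direct per-cell
-- scan toward the edge (objective: simpler; same return value on Pre_).

-- ===== PORT A =====
-- xss[i][j] (shared 2D indexing helper; exact on in-range nonnegative indices, which Pre_ guarantees)
def pvIdx2 {α : Type} (xss : List (List α)) (dflt : α) (i j : Int) : α :=
  PySem.List.pyGetD (PySem.List.pyGetD xss i []) j dflt

-- flow[i][j] = v (i, j are nonnegative wherever the ports use it)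
def pvSet2 (xss : List (List Int)) (i j : Int) (v : Int) : List (List Int) :=
  xss.set i.toNat ((PySem.List.pyGetD xss i []).set j.toNat v)

-- A's 'while True' pointer chase; fuel only makes it total (never exhausted on Pre_)
def pvChase (flow max_len_rt : List (List Int)) (v col edgeD : Int) : Nat → Int → Int
  | 0, y => y
  | fuel+1, y =>
    let x := pvIdx2 flow 0 y col
    if x = edgeD ∨ v > pvIdx2 max_len_rt 0 x col then x
    else pvChase flow max_len_rt v col edgeD fuel x

def get_column_flow (matrix : List (List String)) (max_len_rt : List (List Int)) (direction : Int) : List (List Int) :=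
  let flow0 : List (List Int) := (List.range matrix.length).map (fun _ => List.replicate (matrix.headD []).length 0)
  let n : List Int := PySem.List.pyRange 0 (matrix.length : Int) 1
  let m : List Int := PySem.List.pyRange 0 ((matrix.headD []).length : Int) 1
  -- n[::-1] / m[::-1]: reverse (PySem.List.slice?_none_none_neg_one)
  let r_iter := if direction = 1 then n.reverse else n
  let c_iter := if direction = 1 then m.reverse else m
  let edge_row : Int := if direction = 1 then (matrix.length : Int) - 1 else 0
  r_iter.foldl (fun flow row =>
    c_iter.foldl (fun flow col =>
      if pvIdx2 matrix "" row col = "1" then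
        if row = edge_row ∨ pvIdx2 max_len_rt 0 row col > pvIdx2 max_len_rt 0 (row + direction) col then
          pvSet2 flow row col (row + direction)
        else
          pvSet2 flow row col (pvChase flow max_len_rt (pvIdx2 max_len_rt 0 row col) col
            (edge_row + direction) (matrix.length + 1) (row + direction))
      else flow) flow) flow0

-- ===== PORT B =====
-- B's scan loop 'while y != edge+direction and max_len_rt[y][c] >= v: y += direction'
def pvScanB (max_len_rt : List (List Int)) (v col direction edgeD : Int) : Nat → Int → Int
  | 0, y => y
  | fuel+1, y =>
    if y ≠ edgeD ∧ pvIdx2 max_len_rt 0 y col ≥ v then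
      pvScanB max_len_rt v col direction edgeD fuel (y + direction)
    else y

def get_column_flow_alt (matrix : List (List String)) (max_len_rt : List (List Int)) (direction : Int) : List (List Int) :=
  let N := matrix.length
  let M := (matrix.headD []).length
  let edge : Int := if direction = 1 then (N : Int) - 1 else 0
  (PySem.List.pyRange 0 (N : Int) 1).map (fun r =>
    (PySem.List.pyRange 0 (M : Int) 1).map (fun c =>
      if pvIdx2 matrix "" r c = "1" then
        pvScanB max_len_rt (pvIdx2 max_len_rt 0 r c) c direction (edge + direction) (N + 1) (r + direction)
      else 0))

-- ===== PRECONDITION & SPEC =====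
-- Pre_ excludes: empty matrix / too-short rows (A raises IndexError); and, when some cell is "1",
-- directions other than ±1 and max_len_rt tables whose non-"1" cells are not strict per-column
-- barriers (below every "1" value of their column) — outside that natural domain A's chase reads
-- never-written flow entries and may diverge, return accidental pointers, or raise.
def Pre_get_column_flow (matrix : List (List String)) (max_len_rt : List (List Int)) (direction : Int) : Prop :=
  matrix ≠ [] ∧
  (∀ row ∈ matrix, (matrix.headD []).length ≤ row.length) ∧
  ((∀ i < matrix.length, ∀ j < (matrix.headD []).length, pvIdx2 matrix "" (i : Int) (j : Int) ≠ "1") ∨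
   ((direction = 1 ∨ direction = -1) ∧
    matrix.length ≤ max_len_rt.length ∧
    (∀ row ∈ max_len_rt, (matrix.headD []).length ≤ row.length) ∧
    (∀ i < matrix.length, ∀ j < (matrix.headD []).length, ∀ i' < matrix.length,
      (pvIdx2 matrix "" (i : Int) (j : Int) ≠ "1" ∨ pvIdx2 matrix "" (i' : Int) (j : Int) = "1" ∨
       pvIdx2 max_len_rt 0 (i' : Int) (j : Int) < pvIdx2 max_len_rt 0 (i : Int) (j : Int)))))

instance (matrix : List (List String)) (max_len_rt : List (List Int)) (direction : Int) : Decidable (Pre_get_column_flow matrix max_len_rt direction) := by unfold Pre_get_column_flow; infer_instance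

def pvWitness_get_column_flow : List (List String) × List (List Int) × Int :=
  ([["1", "0"], ["1", "1"]], [[2, 0], [1, 1]], 1)

def Spec_get_column_flow (matrix : List (List String)) (max_len_rt : List (List Int)) (direction : Int) (out : List (List Int)) : Prop := out = get_column_flow_alt matrix max_len_rt direction
instance (matrix : List (List String)) (max_len_rt : List (List Int)) (direction : Int) (out : List (List Int)) : Decidable (Spec_get_column_flow matrix max_len_rt direction out) := by unfold Spec_get_column_flow; infer_instance

-- ===== CLAIM (what is proved, stated in full; the proofs are below) =====
def Claim_equal_get_column_flow : Prop := ∀ (matrix : List (List String)) (max_len_rt : List (List Int)) (direction : Int), Dom_get_column_flow matrix max_len_rt direction → Pre_get_column_flow matrix max_len_rt direction → Spec_get_column_flow matrix max_len_rt direction (get_column_flow matrix max_len_rt direction)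

-- ===== LEMMAS AND PROOFS =====

-- "z is what the scan from y finds": either the edge sentinel with no strictly smaller value
-- in [y, edgeD) (along direction d), or the first index of that segment whose value is < v.
def pvNSV (maxl : List (List Int)) (v c d edgeD : Int) (y z : Int) : Prop :=
  (z = edgeD ∧ ∀ w : Int, 0 ≤ d * (w - y) → 0 < d * (edgeD - w) → v ≤ pvIdx2 maxl 0 w c)
  ∨ (0 ≤ d * (z - y) ∧ 0 < d * (edgeD - z) ∧ pvIdx2 maxl 0 z c < v ∧
     ∀ w : Int, 0 ≤ d * (w - y) → d * (w - z) < 0 → v ≤ pvIdx2 maxl 0 w c)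

lemma pvNSV_unique {maxl : List (List Int)} {v c d edgeD y z1 z2 : Int}
    (hd : d = 1 ∨ d = -1)
    (h1 : pvNSV maxl v c d edgeD y z1) (h2 : pvNSV maxl v c d edgeD y z2) : z1 = z2 := by
  rcases h1 with ⟨hz1, hall1⟩ | ⟨ha1, hb1, hc1, hall1⟩ <;>
    rcases h2 with ⟨hz2, hall2⟩ | ⟨ha2, hb2, hc2, hall2⟩
  · rw [hz1, hz2]
  · have := hall1 z2 ha2 hb2; omega
  · have := hall2 z1 ha1 hb1; omega
  · rcases hd with rfl | rfl
    · rcases lt_trichotomy z1 z2 with h | h | h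
      · have := hall2 z1 ha1 (by omega); omega
      · exact h
      · have := hall1 z2 ha2 (by omega); omega
    · rcases lt_trichotomy z1 z2 with h | h | h
      · have := hall1 z2 ha2 (by omega); omega
      · exact h
      · have := hall2 z1 ha1 (by omega); omega

lemma pvScanB_nsv {maxl : List (List Int)} {v c d edgeD : Int}
    (hd : d = 1 ∨ d = -1) :
    ∀ (fuel : Nat) (y : Int), 0 ≤ d * (edgeD - y) → (d * (edgeD - y)).toNat < fuel →
      pvNSV maxl v c d edgeD y (pvScanB maxl v c d edgeD fuel y) := by
  intro fuel
  induction fuel with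
  | zero => intro y h1 h2; omega
  | succ fuel ih =>
    intro y h1 h2
    simp only [pvScanB]
    by_cases hy : y ≠ edgeD ∧ pvIdx2 maxl 0 y c ≥ v
    · rw [if_pos hy]
      have hstep1 : 0 ≤ d * (edgeD - (y + d)) := by rcases hd with rfl | rfl <;> omega
      have hstep2 : (d * (edgeD - (y + d))).toNat < fuel := by rcases hd with rfl | rfl <;> omega
      have hrec := ih (y + d) hstep1 hstep2
      rcases hrec with ⟨hz, hall⟩ | ⟨ha, hb, hc, hall⟩
      · left
        refine ⟨hz, ?_⟩
        intro w hw1 hw2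
        by_cases hwy : w = y
        · subst hwy; exact hy.2
        · exact hall w (by rcases hd with rfl | rfl <;> omega) hw2
      · right
        refine ⟨by rcases hd with rfl | rfl <;> omega, hb, hc, ?_⟩
        intro w hw1 hw2
        by_cases hwy : w = y
        · subst hwy; exact hy.2
        · exact hall w (by rcases hd with rfl | rfl <;> omega) hw2
    · rw [if_neg hy]
      by_cases hye : y = edgeD
      · left
        refine ⟨hye, ?_⟩
        intro w hw1 hw2
        exfalso; subst hye; rcases hd with rfl | rfl <;> omega
      · have hlt : pvIdx2 maxl 0 y c < v := by
          rcases not_and_or.mp hy with h | h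
          · exact absurd hye (by simpa using h)
          · omega
        right
        refine ⟨by rcases hd with rfl | rfl <;> omega, by rcases hd with rfl | rfl <;> omega, hlt, ?_⟩
        intro w hw1 hw2
        exfalso; rcases hd with rfl | rfl <;> omega

-- proof-side names for A's pieces
def pvEdge (matrix : List (List String)) (d : Int) : Int :=
  if d = 1 then (matrix.length : Int) - 1 else 0

def pvSpec (matrix : List (List String)) (maxl : List (List Int)) (d i j : Int) : Int :=
  pvScanB maxl (pvIdx2 maxl 0 i j) j d (pvEdge matrix d + d) (matrix.length + 1) (i + d)

def pvStepCell (matrix : List (List String)) (maxl : List (List Int)) (d : Int)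
    (row : Int) (flow : List (List Int)) (col : Int) : List (List Int) :=
  if pvIdx2 matrix "" row col = "1" then
    if row = pvEdge matrix d ∨ pvIdx2 maxl 0 row col > pvIdx2 maxl 0 (row + d) col then
      pvSet2 flow row col (row + d)
    else
      pvSet2 flow row col (pvChase flow maxl (pvIdx2 maxl 0 row col) col
        (pvEdge matrix d + d) (matrix.length + 1) (row + d))
  else flow

lemma get_column_flow_eq_fold (matrix : List (List String)) (maxl : List (List Int)) (d : Int) :
    get_column_flow matrix maxl d =
      (if d = 1 then (PySem.List.pyRange 0 (matrix.length : Int) 1).reverse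
       else PySem.List.pyRange 0 (matrix.length : Int) 1).foldl
        (fun flow row =>
          (if d = 1 then (PySem.List.pyRange 0 ((matrix.headD []).length : Int) 1).reverse
           else PySem.List.pyRange 0 ((matrix.headD []).length : Int) 1).foldl
            (pvStepCell matrix maxl d row) flow)
        ((List.range matrix.length).map (fun _ => List.replicate (matrix.headD []).length 0)) := rfl

-- invariant: flow has shape N×M and entry (i,j) is spec where P i j and matrix[i][j]=="1", else 0
def pvInv (matrix : List (List String)) (maxl : List (List Int)) (d : Int)
    (flow : List (List Int)) (P : Int → Int → Prop) : Prop :=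
  flow.length = matrix.length ∧
  (∀ r ∈ flow, r.length = (matrix.headD []).length) ∧
  ∀ i j : Int, 0 ≤ i → i < (matrix.length : Int) → 0 ≤ j → j < ((matrix.headD []).length : Int) →
    ((P i j ∧ pvIdx2 matrix "" i j = "1") → pvIdx2 flow 0 i j = pvSpec matrix maxl d i j) ∧
    (¬ (P i j ∧ pvIdx2 matrix "" i j = "1") → pvIdx2 flow 0 i j = 0)

lemma pvIdx2_eq_getElem {α : Type} (xss : List (List α)) (dflt : α) (i j : Int)
    (hi0 : 0 ≤ i) (hi : i < (xss.length : Int)) (hj0 : 0 ≤ j)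
    (hj : j < ((xss[i.toNat]'(by omega)).length : Int)) :
    pvIdx2 xss dflt i j = (xss[i.toNat]'(by omega))[j.toNat]'(by omega) := by
  unfold pvIdx2
  rw [PySem.List.pyGetD_eq_getElem xss [] hi0 (by exact_mod_cast hi),
      PySem.List.pyGetD_eq_getElem _ dflt hj0 (by exact_mod_cast hj)]

lemma pvSet2_length (xss : List (List Int)) (i j v : Int) : (pvSet2 xss i j v).length = xss.length := by
  simp [pvSet2]

lemma pvSet2_rows (xss : List (List Int)) (i j v : Int) (M : Nat)
    (hi0 : 0 ≤ i) (hi : i < (xss.length : Int))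
    (h : ∀ r ∈ xss, r.length = M) :
    ∀ r ∈ pvSet2 xss i j v, r.length = M := by
  intro r hr
  unfold pvSet2 at hr
  rw [PySem.List.pyGetD_eq_getElem xss [] hi0 (by exact_mod_cast hi)] at hr
  rcases List.mem_or_eq_of_mem_set hr with h1 | h1
  · exact h r h1
  · subst h1
    rw [List.length_set]
    exact h _ (List.getElem_mem _)

lemma pvSet2_get (xss : List (List Int)) (i j v : Int) (i' j' : Int)
    (hi0 : 0 ≤ i) (hi : i < (xss.length : Int)) (hj0 : 0 ≤ j)
    (hi'0 : 0 ≤ i') (hi' : i' < (xss.length : Int)) (hj'0 : 0 ≤ j')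
    (hrow : j < ((xss[i.toNat]'(by omega)).length : Int))
    (hrow' : j' < ((xss[i'.toNat]'(by omega)).length : Int)) :
    pvIdx2 (pvSet2 xss i j v) 0 i' j' = if i' = i ∧ j' = j then v else pvIdx2 xss 0 i' j' := by
  have hiN : i.toNat < xss.length := by omega
  have hi'N : i'.toNat < xss.length := by omega
  have hR : PySem.List.pyGetD xss i [] = xss[i.toNat] :=
    PySem.List.pyGetD_eq_getElem xss [] hi0 (by exact_mod_cast hi)
  unfold pvSet2
  rw [hR]
  have hSlen : (xss.set i.toNat (xss[i.toNat].set j.toNat v)).length = xss.length := by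
    simp
  have hSrow : ((xss.set i.toNat (xss[i.toNat].set j.toNat v))[i'.toNat]'(by omega)).length
      = xss[i'.toNat].length := by
    rw [List.getElem_set]
    split
    · next h => simp [← h]
    · rfl
  rw [pvIdx2_eq_getElem _ 0 i' j' hi'0 (by rw [hSlen]; exact_mod_cast hi') hj'0
      (by rw [hSrow]; exact_mod_cast hrow')]
  rw [pvIdx2_eq_getElem xss 0 i' j' hi'0 hi' hj'0 hrow']
  rcases eq_or_ne i' i with hii | hii
  · subst hii
    simp only [List.getElem_set_self]
    rcases eq_or_ne j' j with hjj | hjj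
    · subst hjj
      rw [List.getElem_set_self]
      simp
    · rw [List.getElem_set_ne (by omega)]
      simp [hjj]
  · simp only [List.getElem_set_ne (show i.toNat ≠ i'.toNat by omega)]
    simp [hii]

-- The pointer chase, started at a "1" cell (r,c) with no strictly smaller value found yet,
-- computes the nearest-strictly-smaller characterisation, provided flow carries pvSpec at
-- every already-processed "1" cell beyond r.  (e abbreviates pvEdge matrix d.)
lemma pvChase_nsv
    (matrix : List (List String)) (maxl flow : List (List Int)) (d e : Int)
    (hde : (d = 1 ∧ e = (matrix.length : Int) - 1) ∨ (d = -1 ∧ e = 0))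
    (hcmp : ∀ i i' c : Int, 0 ≤ i → i < (matrix.length : Int) → 0 ≤ i' → i' < (matrix.length : Int) →
        0 ≤ c → c < ((matrix.headD []).length : Int) →
        pvIdx2 matrix "" i c = "1" → pvIdx2 matrix "" i' c ≠ "1" →
        pvIdx2 maxl 0 i' c < pvIdx2 maxl 0 i c)
    (r c : Int) (hr0 : 0 ≤ r) (hr : r < (matrix.length : Int))
    (hc0 : 0 ≤ c) (hc : c < ((matrix.headD []).length : Int))
    (hm : pvIdx2 matrix "" r c = "1")
    (H : ∀ y : Int, 0 ≤ y → y < (matrix.length : Int) → 0 < d * (y - r) →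
        pvIdx2 matrix "" y c = "1" → pvIdx2 flow 0 y c = pvSpec matrix maxl d y c) :
    ∀ (fuel : Nat) (y : Int), 0 ≤ y → y < (matrix.length : Int) → 0 < d * (y - r) →
        0 ≤ d * (e - y) →
        pvIdx2 maxl 0 r c ≤ pvIdx2 maxl 0 y c →
        (∀ w : Int, 0 ≤ d * (w - (r + d)) → d * (w - y) ≤ 0 → pvIdx2 maxl 0 r c ≤ pvIdx2 maxl 0 w c) →
        (d * (e - y)).toNat < fuel →
        pvNSV maxl (pvIdx2 maxl 0 r c) c d (e + d) (r + d)
          (pvChase flow maxl (pvIdx2 maxl 0 r c) c (e + d) fuel y) := by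
  have hd : d = 1 ∨ d = -1 := by rcases hde with ⟨h1, _⟩ | ⟨h1, _⟩ <;> [left; right] <;> exact h1
  intro fuel
  induction fuel with
  | zero => intro y _ _ _ _ _ _ hf; omega
  | succ fuel ih =>
    intro y hy0 hyN hyr hye hvy hseg hf
    have hmy : pvIdx2 matrix "" y c = "1" := by
      by_contra hny
      have := hcmp r y c hr0 hr hy0 hyN hc0 hc hm hny
      omega
    simp only [pvChase]
    rw [H y hy0 hyN hyr hmy]
    have hspec_edge : pvEdge matrix d = e := by
      rcases hde with ⟨rfl, rfl⟩ | ⟨rfl, rfl⟩ <;> simp [pvEdge]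
    have hx_nsv : pvNSV maxl (pvIdx2 maxl 0 y c) c d (e + d) (y + d)
        (pvSpec matrix maxl d y c) := by
      rw [pvSpec, hspec_edge]
      apply pvScanB_nsv hd
      · rcases hde with ⟨rfl, rfl⟩ | ⟨rfl, rfl⟩ <;> omega
      · rcases hde with ⟨rfl, rfl⟩ | ⟨rfl, rfl⟩ <;> omega
    set x := pvSpec matrix maxl d y c with hxdef
    by_cases hbr : x = e + d ∨ pvIdx2 maxl 0 r c > pvIdx2 maxl 0 x c
    · rw [if_pos hbr]
      rcases hx_nsv with ⟨hz, hall⟩ | ⟨ha, hb, hcx, hall⟩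
      · -- the chain ran to the edge: nothing below value-at-y, hence nothing below value-at-r
        left
        refine ⟨hz, ?_⟩
        intro w hw1 hw2
        by_cases hwy : d * (w - y) ≤ 0
        · exact hseg w hw1 hwy
        · exact le_trans hvy (hall w (by rcases hd with rfl | rfl <;> omega) hw2)
      · -- the chain found x with value < value-at-y; the branch test makes it < value-at-r too
        rcases hbr with hxe | hxlt
        · exfalso; rw [hxe] at hb; rcases hd with rfl | rfl <;> omega
        · right
          refine ⟨by rcases hd with rfl | rfl <;> omega, hb, by omega, ?_⟩
          intro w hw1 hw2
          by_cases hwy : d * (w - y) ≤ 0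
          · exact hseg w hw1 hwy
          · exact le_trans hvy (hall w (by rcases hd with rfl | rfl <;> omega) hw2)
    · rw [if_neg hbr]
      obtain ⟨hxne, hxge'⟩ := not_or.mp hbr
      have hxge : pvIdx2 maxl 0 r c ≤ pvIdx2 maxl 0 x c := by omega
      rcases hx_nsv with ⟨hz, _⟩ | ⟨ha, hb, hcx, hall⟩
      · exact absurd hz hxne
      · have hx0 : 0 ≤ x := by rcases hde with ⟨rfl, rfl⟩ | ⟨rfl, rfl⟩ <;> omega
        have hxN : x < (matrix.length : Int) := by
          rcases hde with ⟨rfl, rfl⟩ | ⟨rfl, rfl⟩ <;> omega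
        apply ih x hx0 hxN
        · rcases hd with rfl | rfl <;> omega
        · rcases hd with rfl | rfl <;> omega
        · exact hxge
        · intro w hw1 hw2
          by_cases hwy : d * (w - y) ≤ 0
          · exact hseg w hw1 hwy
          · rcases eq_or_ne w x with rfl | hwx
            · exact hxge
            · exact le_trans hvy (hall w (by rcases hd with rfl | rfl <;> omega)
                (by rcases hd with rfl | rfl <;> omega))
        · rcases hd with rfl | rfl <;> omega

-- the value A writes at a "1" cell equals pvSpec
lemma pvCell_value
    (matrix : List (List String)) (maxl flow : List (List Int)) (d e : Int)
    (hde : (d = 1 ∧ e = (matrix.length : Int) - 1) ∨ (d = -1 ∧ e = 0))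
    (hcmp : ∀ i i' c : Int, 0 ≤ i → i < (matrix.length : Int) → 0 ≤ i' → i' < (matrix.length : Int) →
        0 ≤ c → c < ((matrix.headD []).length : Int) →
        pvIdx2 matrix "" i c = "1" → pvIdx2 matrix "" i' c ≠ "1" →
        pvIdx2 maxl 0 i' c < pvIdx2 maxl 0 i c)
    (r c : Int) (hr0 : 0 ≤ r) (hr : r < (matrix.length : Int))
    (hc0 : 0 ≤ c) (hc : c < ((matrix.headD []).length : Int))
    (hm : pvIdx2 matrix "" r c = "1")
    (H : ∀ y : Int, 0 ≤ y → y < (matrix.length : Int) → 0 < d * (y - r) →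
        pvIdx2 matrix "" y c = "1" → pvIdx2 flow 0 y c = pvSpec matrix maxl d y c) :
    (if r = e ∨ pvIdx2 maxl 0 r c > pvIdx2 maxl 0 (r + d) c then r + d
     else pvChase flow maxl (pvIdx2 maxl 0 r c) c (e + d) (matrix.length + 1) (r + d))
      = pvSpec matrix maxl d r c := by
  have hd : d = 1 ∨ d = -1 := by rcases hde with ⟨h1, _⟩ | ⟨h1, _⟩ <;> [left; right] <;> exact h1
  have hspec_edge : pvEdge matrix d = e := by
    rcases hde with ⟨rfl, rfl⟩ | ⟨rfl, rfl⟩ <;> simp [pvEdge]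
  have hspec_nsv : pvNSV maxl (pvIdx2 maxl 0 r c) c d (e + d) (r + d) (pvSpec matrix maxl d r c) := by
    rw [pvSpec, hspec_edge]
    apply pvScanB_nsv hd
    · rcases hde with ⟨rfl, rfl⟩ | ⟨rfl, rfl⟩ <;> omega
    · rcases hde with ⟨rfl, rfl⟩ | ⟨rfl, rfl⟩ <;> omega
  refine pvNSV_unique hd ?_ hspec_nsv
  split_ifs with hbr
  · by_cases hre : r = e
    · left
      refine ⟨by rw [hre], ?_⟩
      intro w hw1 hw2
      exfalso; rw [hre] at hw1; rcases hd with rfl | rfl <;> omega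
    · have hlt : pvIdx2 maxl 0 (r + d) c < pvIdx2 maxl 0 r c := by
        rcases hbr with h | h
        · exact absurd h hre
        · omega
      right
      refine ⟨by rcases hd with rfl | rfl <;> omega,
        by rcases hde with ⟨rfl, rfl⟩ | ⟨rfl, rfl⟩ <;> omega, hlt, ?_⟩
      intro w hw1 hw2
      exfalso; rcases hd with rfl | rfl <;> omega
  · obtain ⟨hre, hge'⟩ := not_or.mp hbr
    have hge : pvIdx2 maxl 0 r c ≤ pvIdx2 maxl 0 (r + d) c := by omega
    apply pvChase_nsv matrix maxl flow d e hde hcmp r c hr0 hr hc0 hc hm H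
    · rcases hde with ⟨rfl, rfl⟩ | ⟨rfl, rfl⟩ <;> omega
    · rcases hde with ⟨rfl, rfl⟩ | ⟨rfl, rfl⟩ <;> omega
    · rcases hd with rfl | rfl <;> omega
    · rcases hde with ⟨rfl, rfl⟩ | ⟨rfl, rfl⟩ <;> omega
    · exact hge
    · intro w hw1 hw2
      have hw : w = r + d := by rcases hd with rfl | rfl <;> omega
      rw [hw]; exact hge
    · rcases hde with ⟨rfl, rfl⟩ | ⟨rfl, rfl⟩ <;> omega

-- predicate used while sweeping one row: processed rows beyond r, plus columns Q of row r
def pvPRow (d r : Int) (Q : Int → Prop) (i j : Int) : Prop := 0 < d * (i - r) ∨ (i = r ∧ Q j)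

lemma pvInv_congr (matrix : List (List String)) (maxl : List (List Int)) (d : Int)
    (flow : List (List Int)) (P Q : Int → Int → Prop)
    (h : ∀ i j : Int, 0 ≤ i → i < (matrix.length : Int) → 0 ≤ j → j < ((matrix.headD []).length : Int) →
        (P i j ↔ Q i j))
    (hinv : pvInv matrix maxl d flow P) : pvInv matrix maxl d flow Q := by
  obtain ⟨h1, h2, h3⟩ := hinv
  refine ⟨h1, h2, fun i j a b a' b' => ?_⟩
  have hpq := h i j a b a' b'
  have hold := h3 i j a b a' b'
  exact ⟨fun hq => hold.1 ⟨hpq.mpr hq.1, hq.2⟩, fun hn => hold.2 fun hx => hn ⟨hpq.mp hx.1, hx.2⟩⟩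

-- one inner-loop step: processing column c of row r extends the set of settled cells by (r,c)
lemma pvStepCell_inv
    (matrix : List (List String)) (maxl : List (List Int)) (d e : Int)
    (hde : (d = 1 ∧ e = (matrix.length : Int) - 1) ∨ (d = -1 ∧ e = 0))
    (hcmp : ∀ i i' c : Int, 0 ≤ i → i < (matrix.length : Int) → 0 ≤ i' → i' < (matrix.length : Int) →
        0 ≤ c → c < ((matrix.headD []).length : Int) →
        pvIdx2 matrix "" i c = "1" → pvIdx2 matrix "" i' c ≠ "1" →
        pvIdx2 maxl 0 i' c < pvIdx2 maxl 0 i c)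
    (r : Int) (hr0 : 0 ≤ r) (hr : r < (matrix.length : Int))
    (Q : Int → Prop) (flow : List (List Int)) (c : Int)
    (hc0 : 0 ≤ c) (hc : c < ((matrix.headD []).length : Int))
    (hinv : pvInv matrix maxl d flow (pvPRow d r Q)) :
    pvInv matrix maxl d (pvStepCell matrix maxl d r flow c) (pvPRow d r (fun j => Q j ∨ j = c)) := by
  obtain ⟨hlen, hrows, hent⟩ := hinv
  have hspec_edge : pvEdge matrix d = e := by
    rcases hde with ⟨rfl, rfl⟩ | ⟨rfl, rfl⟩ <;> simp [pvEdge]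
  by_cases hm : pvIdx2 matrix "" r c = "1"
  · -- a "1" cell: flow gets pvSpec at (r,c)
    have hbody : pvStepCell matrix maxl d r flow c = pvSet2 flow r c (pvSpec matrix maxl d r c) := by
      rw [pvStepCell, hspec_edge, if_pos hm, ← apply_ite (pvSet2 flow r c)]
      congr 1
      apply pvCell_value matrix maxl flow d e hde hcmp r c hr0 hr hc0 hc hm
      intro y hy0 hyN hyr h1
      exact (hent y c hy0 hyN hc0 hc).1 ⟨Or.inl hyr, h1⟩
    rw [hbody]
    have hrN : r.toNat < flow.length := by omega
    have hrowlen : c < ((flow[r.toNat]'hrN).length : Int) := by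
      rw [hrows _ (List.getElem_mem _)]; omega
    refine ⟨by rw [pvSet2_length, hlen], ?_, ?_⟩
    · exact pvSet2_rows flow r c _ _ hr0 (by omega) hrows
    · intro i j hi0 hi hj0 hj
      have hiN : i.toNat < flow.length := by omega
      have hrowlen' : j < ((flow[i.toNat]'hiN).length : Int) := by
        rw [hrows _ (List.getElem_mem _)]; omega
      rw [pvSet2_get flow r c _ i j hr0 (by omega) hc0 hi0 (by omega) hj0 hrowlen hrowlen']
      have hold := hent i j hi0 hi hj0 hj
      by_cases hij : i = r ∧ j = c
      · rw [if_pos hij]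
        obtain ⟨rfl, rfl⟩ := hij
        constructor
        · intro _; rfl
        · intro hn; exact absurd ⟨Or.inr ⟨rfl, Or.inr rfl⟩, hm⟩ hn
      · rw [if_neg hij]
        constructor
        · intro ⟨hP, h1⟩
          refine hold.1 ⟨?_, h1⟩
          rcases hP with h | ⟨rfl, hQ⟩
          · exact Or.inl h
          · rcases hQ with hQ | rfl
            · exact Or.inr ⟨rfl, hQ⟩
            · exact absurd ⟨rfl, rfl⟩ hij
        · intro hn
          refine hold.2 fun hx => hn ⟨?_, hx.2⟩
          rcases hx.1 with h | ⟨rfl, hQ⟩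
          · exact Or.inl h
          · exact Or.inr ⟨rfl, Or.inl hQ⟩
  · -- not a "1" cell: flow unchanged, and the new cell never satisfies the predicate
    rw [pvStepCell, if_neg hm]
    refine ⟨hlen, hrows, fun i j hi0 hi hj0 hj => ?_⟩
    have hold := hent i j hi0 hi hj0 hj
    constructor
    · intro ⟨hP, h1⟩
      refine hold.1 ⟨?_, h1⟩
      rcases hP with h | ⟨rfl, hQ⟩
      · exact Or.inl h
      · rcases hQ with hQ | rfl
        · exact Or.inr ⟨rfl, hQ⟩
        · exact absurd h1 hm
    · intro hn
      refine hold.2 fun hx => hn ⟨?_, hx.2⟩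
      rcases hx.1 with h | ⟨rfl, hQ⟩
      · exact Or.inl h
      · exact Or.inr ⟨rfl, Or.inl hQ⟩

-- the whole inner loop over a list of (in-range) columns
lemma pvColFold
    (matrix : List (List String)) (maxl : List (List Int)) (d e : Int)
    (hde : (d = 1 ∧ e = (matrix.length : Int) - 1) ∨ (d = -1 ∧ e = 0))
    (hcmp : ∀ i i' c : Int, 0 ≤ i → i < (matrix.length : Int) → 0 ≤ i' → i' < (matrix.length : Int) →
        0 ≤ c → c < ((matrix.headD []).length : Int) →
        pvIdx2 matrix "" i c = "1" → pvIdx2 matrix "" i' c ≠ "1" →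
        pvIdx2 maxl 0 i' c < pvIdx2 maxl 0 i c)
    (r : Int) (hr0 : 0 ≤ r) (hr : r < (matrix.length : Int)) :
    ∀ (cols : List Int) (flow : List (List Int)) (Q : Int → Prop),
      (∀ c' ∈ cols, 0 ≤ c' ∧ c' < ((matrix.headD []).length : Int)) →
      pvInv matrix maxl d flow (pvPRow d r Q) →
      pvInv matrix maxl d (cols.foldl (pvStepCell matrix maxl d r) flow)
        (pvPRow d r (fun j => Q j ∨ j ∈ cols)) := by
  intro cols
  induction cols with
  | nil =>
    intro flow Q _ hinv
    simp only [List.foldl_nil]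
    refine pvInv_congr matrix maxl d flow _ _ (fun i j _ _ _ _ => ?_) hinv
    simp [pvPRow]
  | cons c cols ihc =>
    intro flow Q hb hinv
    simp only [List.foldl_cons]
    have h1 := pvStepCell_inv matrix maxl d e hde hcmp r hr0 hr Q flow c
      (hb c List.mem_cons_self).1 (hb c List.mem_cons_self).2 hinv
    have h2 := ihc (pvStepCell matrix maxl d r flow c) (fun j => Q j ∨ j = c)
      (fun c' hc' => hb c' (List.mem_cons_of_mem _ hc')) h1
    refine pvInv_congr matrix maxl d _ _ _ (fun i j _ _ _ _ => ?_) h2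
    simp [pvPRow, List.mem_cons]
    tauto

lemma pvFlow0_inv (matrix : List (List String)) (maxl : List (List Int)) (d e : Int)
    (hde : (d = 1 ∧ e = (matrix.length : Int) - 1) ∨ (d = -1 ∧ e = 0)) :
    pvInv matrix maxl d
      ((List.range matrix.length).map (fun _ => List.replicate (matrix.headD []).length 0))
      (fun i _ => 0 < d * (i - e)) := by
  refine ⟨by simp, ?_, ?_⟩
  · intro r hrm
    rcases List.mem_map.mp hrm with ⟨k, _, rfl⟩
    simp
  · intro i j hi0 hi hj0 hj
    have hzero : pvIdx2 ((List.range matrix.length).map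
        (fun _ => List.replicate (matrix.headD []).length 0)) (0 : Int) i j = 0 := by
      rw [pvIdx2_eq_getElem _ _ i j hi0 (by simpa using hi) hj0 (by simpa using hj)]
      simp
    constructor
    · intro ⟨hP, _⟩
      exfalso; rcases hde with ⟨rfl, rfl⟩ | ⟨rfl, rfl⟩ <;> omega
    · intro _; exact hzero

lemma c_iter_mem (M dir : Int) (c : Int) :
    (c ∈ (if dir = 1 then (PySem.List.pyRange 0 M 1).reverse else PySem.List.pyRange 0 M 1)) ↔
      (0 ≤ c ∧ c < M) := by
  split <;> simp [PySem.List.mem_pyRange_one]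

lemma r_iter_eq (matrix : List (List String)) (d e : Int)
    (hde : (d = 1 ∧ e = (matrix.length : Int) - 1) ∨ (d = -1 ∧ e = 0)) :
    (if d = 1 then (PySem.List.pyRange 0 (matrix.length : Int) 1).reverse
     else PySem.List.pyRange 0 (matrix.length : Int) 1)
      = (List.range matrix.length).map (fun t : Nat => e - (t : Int) * d) := by
  rcases hde with ⟨rfl, rfl⟩ | ⟨rfl, rfl⟩
  · rw [if_pos rfl]
    have h1 := PySem.List.pyRange_neg_one_eq_reverse ((matrix.length : Int) - 1) (-1)
    norm_num at h1
    rw [← h1, PySem.List.pyRange_neg_one,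
      show ((matrix.length : Int) - 1 - -1).toNat = matrix.length from by omega]
    apply List.map_congr_left
    intro a _
    omega
  · rw [if_neg (by norm_num), PySem.List.pyRange_one,
      show ((matrix.length : Int) - 0).toNat = matrix.length from by omega]
    apply List.map_congr_left
    intro a _
    omega

lemma pvRowFold
    (matrix : List (List String)) (maxl : List (List Int)) (d e : Int)
    (hde : (d = 1 ∧ e = (matrix.length : Int) - 1) ∨ (d = -1 ∧ e = 0))
    (hcmp : ∀ i i' c : Int, 0 ≤ i → i < (matrix.length : Int) → 0 ≤ i' → i' < (matrix.length : Int) →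
        0 ≤ c → c < ((matrix.headD []).length : Int) →
        pvIdx2 matrix "" i c = "1" → pvIdx2 matrix "" i' c ≠ "1" →
        pvIdx2 maxl 0 i' c < pvIdx2 maxl 0 i c) :
    ∀ t : Nat, t ≤ matrix.length →
      pvInv matrix maxl d
        (((List.range t).map (fun k : Nat => e - (k : Int) * d)).foldl
          (fun flow row =>
            (if d = 1 then (PySem.List.pyRange 0 ((matrix.headD []).length : Int) 1).reverse
             else PySem.List.pyRange 0 ((matrix.headD []).length : Int) 1).foldl
              (pvStepCell matrix maxl d row) flow)
          ((List.range matrix.length).map (fun _ => List.replicate (matrix.headD []).length 0)))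
        (fun i _ => 0 < d * (i - (e - (t : Int) * d))) := by
  intro t
  induction t with
  | zero =>
    intro _
    simpa using pvFlow0_inv matrix maxl d e hde
  | succ t iht =>
    intro ht
    rw [List.range_succ, List.map_append, List.foldl_append]
    simp only [List.map_cons, List.map_nil, List.foldl_cons, List.foldl_nil]
    have hr0 : (0 : Int) ≤ e - (t : Int) * d := by
      rcases hde with ⟨rfl, rfl⟩ | ⟨rfl, rfl⟩ <;> omega
    have hrN : e - (t : Int) * d < (matrix.length : Int) := by
      rcases hde with ⟨rfl, rfl⟩ | ⟨rfl, rfl⟩ <;> omega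
    have hbase := pvInv_congr matrix maxl d _ _ (pvPRow d (e - (t : Int) * d) (fun _ => False))
      (fun i j _ _ _ _ => by simp [pvPRow]) (iht (by omega))
    have hfold := pvColFold matrix maxl d e hde hcmp (e - (t : Int) * d) hr0 hrN _ _ _
      (fun c' hc' => (c_iter_mem _ d c').mp hc') hbase
    refine pvInv_congr matrix maxl d _ _ _ (fun i j hi0 hi hj0 hj => ?_) hfold
    have hmem : (j ∈ (if d = 1 then (PySem.List.pyRange 0 ((matrix.headD []).length : Int) 1).reverse
        else PySem.List.pyRange 0 ((matrix.headD []).length : Int) 1)) ↔ True := by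
      rw [c_iter_mem]; exact iff_of_true ⟨hj0, hj⟩ trivial
    simp only [pvPRow, false_or, hmem, and_true]
    rcases hde with ⟨rfl, rfl⟩ | ⟨rfl, rfl⟩ <;> (push_cast; omega)

lemma alt_length (matrix : List (List String)) (maxl : List (List Int)) (d : Int) :
    (get_column_flow_alt matrix maxl d).length = matrix.length := by
  simp [get_column_flow_alt, PySem.List.length_pyRange_one]

lemma alt_row_length (matrix : List (List String)) (maxl : List (List Int)) (d : Int) :
    ∀ row ∈ get_column_flow_alt matrix maxl d, row.length = (matrix.headD []).length := by
  intro row hrow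
  simp only [get_column_flow_alt] at hrow
  rcases List.mem_map.mp hrow with ⟨r, _, rfl⟩
  simp [PySem.List.length_pyRange_one]

lemma alt_entry (matrix : List (List String)) (maxl : List (List Int)) (d : Int)
    (i j : Nat) (hi : i < matrix.length) (hj : j < (matrix.headD []).length) :
    ((get_column_flow_alt matrix maxl d)[i]'(by rw [alt_length]; exact hi))[j]'(by
        rw [alt_row_length matrix maxl d _ (List.getElem_mem _)]; exact hj)
      = if pvIdx2 matrix "" (i : Int) (j : Int) = "1" then pvSpec matrix maxl d (i : Int) (j : Int)
        else 0 := by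
  simp only [get_column_flow_alt, List.getElem_map, PySem.List.getElem_pyRange_one, zero_add,
    pvSpec, pvEdge]

lemma colfold_no1 (matrix : List (List String)) (maxl : List (List Int)) (d r : Int)
    (hr0 : 0 ≤ r) (hrN : r < (matrix.length : Int))
    (hno1 : ∀ i : Int, 0 ≤ i → i < (matrix.length : Int) → ∀ j : Int, 0 ≤ j →
      j < ((matrix.headD []).length : Int) → pvIdx2 matrix "" i j ≠ "1") :
    ∀ (cols : List Int), (∀ c' ∈ cols, 0 ≤ c' ∧ c' < ((matrix.headD []).length : Int)) →
      ∀ flow, cols.foldl (pvStepCell matrix maxl d r) flow = flow := by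
  intro cols
  induction cols with
  | nil => intro _ flow; rfl
  | cons c cols ih =>
    intro hb flow
    simp only [List.foldl_cons]
    rw [show pvStepCell matrix maxl d r flow c = flow from by
      rw [pvStepCell, if_neg (hno1 r hr0 hrN c (hb c List.mem_cons_self).1 (hb c List.mem_cons_self).2)]]
    exact ih (fun c' hc' => hb c' (List.mem_cons_of_mem _ hc')) flow

lemma rowfold_no1 (matrix : List (List String)) (maxl : List (List Int)) (d : Int)
    (hno1 : ∀ i : Int, 0 ≤ i → i < (matrix.length : Int) → ∀ j : Int, 0 ≤ j →
      j < ((matrix.headD []).length : Int) → pvIdx2 matrix "" i j ≠ "1") :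
    ∀ (rows : List Int), (∀ r' ∈ rows, 0 ≤ r' ∧ r' < (matrix.length : Int)) →
      ∀ (cols : List Int), (∀ c' ∈ cols, 0 ≤ c' ∧ c' < ((matrix.headD []).length : Int)) →
      ∀ flow,
        rows.foldl (fun flow row => cols.foldl (pvStepCell matrix maxl d row) flow) flow = flow := by
  intro rows
  induction rows with
  | nil => intro _ cols _ flow; rfl
  | cons r rows ih =>
    intro hb cols hcols flow
    simp only [List.foldl_cons]
    rw [colfold_no1 matrix maxl d r (hb r List.mem_cons_self).1 (hb r List.mem_cons_self).2
      hno1 cols hcols flow]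
    exact ih (fun r' hr' => hb r' (List.mem_cons_of_mem _ hr')) cols hcols flow

-- ===== VERDICT (by name: the statement is the Claim_ definition above) =====
theorem get_column_flow_spec : Claim_equal_get_column_flow := by
  intro matrix maxl direction _ hpre
  unfold Spec_get_column_flow
  obtain ⟨hne, _, hrest⟩ := hpre
  rcases hrest with hno1N | ⟨hd, _, _, hcmpN⟩
  · -- no "1" cell at all: A leaves the zero table, B emits zeros
    have hno1 : ∀ i : Int, 0 ≤ i → i < (matrix.length : Int) → ∀ j : Int, 0 ≤ j →
        j < ((matrix.headD []).length : Int) → pvIdx2 matrix "" i j ≠ "1" := by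
      intro i hi0 hi j hj0 hj
      have := hno1N i.toNat (by omega) j.toNat (by omega)
      rwa [Int.toNat_of_nonneg hi0, Int.toNat_of_nonneg hj0] at this
    rw [get_column_flow_eq_fold,
      rowfold_no1 matrix maxl direction hno1 _
        (fun r' hr' => by
          rcases (by split at hr' <;> simp_all [PySem.List.mem_pyRange_one] :
            0 ≤ r' ∧ r' < (matrix.length : Int)) with ⟨h1, h2⟩
          exact ⟨h1, h2⟩)
        _ (fun c' hc' => (c_iter_mem _ direction c').mp hc') _]
    apply List.ext_getElem (by simp [alt_length])
    intro i h1 h2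
    apply List.ext_getElem (by
      rw [alt_row_length matrix maxl direction _ (List.getElem_mem _)]; simp)
    intro j hj1 hj2
    rw [alt_entry matrix maxl direction i j (by simpa using h1)
      (by simpa using hj1)]
    simp only [List.getElem_map]
    rw [if_neg (hno1 i (by omega) (by exact_mod_cast (by simpa using h1)) j (by omega)
      (by exact_mod_cast (by simpa using hj1)))]
    simp
  · -- the real case
    have hcmp : ∀ i i' c : Int, 0 ≤ i → i < (matrix.length : Int) → 0 ≤ i' →
        i' < (matrix.length : Int) → 0 ≤ c → c < ((matrix.headD []).length : Int) →
        pvIdx2 matrix "" i c = "1" → pvIdx2 matrix "" i' c ≠ "1" →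
        pvIdx2 maxl 0 i' c < pvIdx2 maxl 0 i c := by
      intro i i' c hi0 hi hi'0 hi' hc0 hc h1 h2
      have := hcmpN i.toNat (by omega) c.toNat (by omega) i'.toNat (by omega)
      rw [Int.toNat_of_nonneg hi0, Int.toNat_of_nonneg hc0, Int.toNat_of_nonneg hi'0] at this
      rcases this with h | h | h
      · exact absurd h1 h
      · exact absurd h h2
      · exact h
    have hde : (direction = 1 ∧ (if direction = 1 then (matrix.length : Int) - 1 else 0)
          = (matrix.length : Int) - 1) ∨
        (direction = -1 ∧ (if direction = 1 then (matrix.length : Int) - 1 else 0) = 0) := by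
      rcases hd with rfl | rfl
      · exact Or.inl ⟨rfl, if_pos rfl⟩
      · exact Or.inr ⟨rfl, if_neg (by norm_num)⟩
    have hinv := pvRowFold matrix maxl direction _ hde hcmp matrix.length le_rfl
    rw [← r_iter_eq matrix direction _ hde, ← get_column_flow_eq_fold] at hinv
    obtain ⟨hlen, hrows2, hent⟩ := hinv
    apply List.ext_getElem (by rw [hlen, alt_length])
    intro i h1 h2
    apply List.ext_getElem (by
      rw [hrows2 _ (List.getElem_mem _), alt_row_length matrix maxl direction _ (List.getElem_mem _)])
    intro j hj1 hj2
    have hiN : i < matrix.length := by omega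
    have hjM : j < (matrix.headD []).length := by
      have := hrows2 _ (List.getElem_mem h1)
      omega
    have hij := pvIdx2_eq_getElem (get_column_flow matrix maxl direction) 0 (i : Int) (j : Int)
      (by omega) (by rw [hlen]; exact_mod_cast hiN) (by omega)
      (by simp only [Int.toNat_natCast]; exact_mod_cast hj1)
    simp only [Int.toNat_natCast] at hij
    rw [← hij, alt_entry matrix maxl direction i j hiN hjM]
    have hentij := hent (i : Int) (j : Int) (by omega) (by exact_mod_cast hiN) (by omega)
      (by exact_mod_cast hjM)
    by_cases hm : pvIdx2 matrix "" (i : Int) (j : Int) = "1"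
    · rw [if_pos hm]
      apply hentij.1
      refine ⟨?_, hm⟩
      rcases hde with ⟨rfl, _⟩ | ⟨rfl, _⟩ <;> (push_cast; omega)
    · rw [if_neg hm]
      exact hentij.2 fun hx => hm hx.2
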